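-- pv_equiv track=rewrite | github.com/Yudaeun/ReadyForCodingTest | 프로그래머스/unrated/135808. 과일 장수/과일 장수.py | solution
-- ===== SOURCE A (Python) =====
-- def solution(k, m, score):
--     answer = 0
--     min_score=99999999
--
--     score.sort(reverse=True)
--
--     for i in range(len(score)):
--         if(i%m==0 and i>0):
--             answer+=m*min_score
--             min_score=99999999
--
--         min_score=min(min_score,score[i])
--
--     if (len(score)%m==0):
--         answer+=m*min_score
--
--     return answer
-- ===== SOURCE B (Python) =====
-- def solution(k, m, score):
--     score.sort(reverse=True)
--     boxes = len(score) // m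
--     return sum(m * score[(j + 1) * m - 1] for j in range(boxes))
-- ===== Notes on version B (the rewrite author's own statement) =====
-- stated objective: simpler
-- what changed: Replaces the element-wise loop with running sentinel minimum and end-of-list patch-up by a direct box-wise sum: after the descending in-place sort each full box's minimum is its last element, so B sums m*score[(j+1)*m-1] over the len//m complete boxes, doing len//m index lookups instead of n loop iterations.
-- intended difference: On an empty score list A returns m*99999999 from its untouched sentinel, and when the m largest scores all exceed 99999999 A caps each such box's minimum at the sentinel 99999999; B returns 0 resp. the sum of the true box minima, which is the intended revenue. — e.g. on solution(0, 1, [100000000]): A returns 99999999, B returns 100000000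
-- outside the precondition, e.g. on solution(0, -2, [3, 1, 2]): A returns -4, B returns 0; on solution(0, 0, [1]): A raises ZeroDivisionError, B raises ZeroDivisionError
import Mathlib
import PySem

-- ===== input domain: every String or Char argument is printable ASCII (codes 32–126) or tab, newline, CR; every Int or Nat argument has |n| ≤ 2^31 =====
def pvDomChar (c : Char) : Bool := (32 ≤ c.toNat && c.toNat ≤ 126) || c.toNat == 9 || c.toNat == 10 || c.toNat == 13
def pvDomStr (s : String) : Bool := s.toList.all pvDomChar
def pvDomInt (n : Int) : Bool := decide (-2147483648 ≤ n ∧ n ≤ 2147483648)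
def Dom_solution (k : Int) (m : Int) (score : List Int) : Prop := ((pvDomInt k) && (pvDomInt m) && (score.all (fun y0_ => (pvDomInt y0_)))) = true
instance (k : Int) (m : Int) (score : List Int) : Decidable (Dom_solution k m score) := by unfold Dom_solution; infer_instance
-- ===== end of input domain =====

-- B replaces A's running-minimum-with-sentinel loop by a direct sum over the len//m complete
-- boxes of m times each box's last (smallest) element after the descending sort (objective:
-- simpler).  Both A and B sort 'score' in place; the theorems are about the return value
-- (the mutation is identical on both sides).

-- ===== PORT A =====
def solution (k : Int) (m : Int) (score : List Int) : Int :=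
  let t := PySem.List.sorted score (fun x => x) true   -- score.sort(reverse=True)
  let st := (PySem.List.pyRange 0 (t.length : Int) 1).foldl
    (fun (st : Int × Int) i =>
      let st := if PySem.Int.mod i m == 0 && decide (0 < i)
                then (st.1 + m * st.2, (99999999 : Int)) else st
      (st.1, min st.2 (PySem.List.pyGetD t i 0)))
    (0, 99999999)
  if PySem.Int.mod (t.length : Int) m == 0 then st.1 + m * st.2 else st.1

-- ===== PORT B =====
def solution_alt (k : Int) (m : Int) (score : List Int) : Int :=
  let t := PySem.List.sorted score (fun x => x) true   -- score.sort(reverse=True)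
  let boxes := PySem.Int.floordiv (t.length : Int) m
  ((PySem.List.pyRange 0 boxes 1).map
    (fun j => m * PySem.List.pyGetD t ((j + 1) * m - 1) 0)).sum

-- ===== PRECONDITION & SPEC =====
-- Pre_ excludes m = 0, on which A raises ZeroDivisionError (i % m), and m < 0, outside the
-- natural domain of a box size (A then returns meaningless negative revenue, B returns 0).
def Pre_solution (k : Int) (m : Int) (score : List Int) : Prop := 1 ≤ m
instance (k : Int) (m : Int) (score : List Int) : Decidable (Pre_solution k m score) := by
  unfold Pre_solution; infer_instance

def pvWitness_solution : Int × Int × List Int := (4, 2, [4, 1, 2, 3, 1])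

-- On an empty score list A returns m*99999999 from its untouched sentinel, and when the m
-- largest scores all exceed 99999999 A caps each such box's minimum at the sentinel 99999999;
-- B returns 0 resp. the sum of the true box minima, which is the intended revenue.
def D_solution (k : Int) (m : Int) (score : List Int) : Prop :=
  score = [] ∨ m ≤ (score.countP (fun x => 99999999 < x) : Int)
instance (k : Int) (m : Int) (score : List Int) : Decidable (D_solution k m score) := by
  unfold D_solution; infer_instance

def Spec_solution (k : Int) (m : Int) (score : List Int) (out : Int) : Prop :=
  ¬ D_solution k m score → out = solution_alt k m score
instance (k : Int) (m : Int) (score : List Int) (out : Int) : Decidable (Spec_solution k m score out) := by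
  unfold Spec_solution; infer_instance

def pvDiffWitness_solution : Int × Int × List Int := (0, 1, [100000000])
def pvDiffWitnessOut_solution : Int × Int := (99999999, 100000000)

-- ===== CLAIM (what is proved, stated in full; the proofs are below) =====
def Claim_unchanged_solution : Prop := ∀ (k : Int) (m : Int) (score : List Int), Dom_solution k m score → Pre_solution k m score → Spec_solution k m score (solution k m score)
def Claim_changed_solution : Prop := Dom_solution (pvDiffWitness_solution.1) (pvDiffWitness_solution.2.1) (pvDiffWitness_solution.2.2) ∧ Pre_solution (pvDiffWitness_solution.1) (pvDiffWitness_solution.2.1) (pvDiffWitness_solution.2.2) ∧ D_solution (pvDiffWitness_solution.1) (pvDiffWitness_solution.2.1) (pvDiffWitness_solution.2.2) ∧ solution (pvDiffWitness_solution.1) (pvDiffWitness_solution.2.1) (pvDiffWitness_solution.2.2) = pvDiffWitnessOut_solution.1 ∧ solution_alt (pvDiffWitness_solution.1) (pvDiffWitness_solution.2.1) (pvDiffWitness_solution.2.2) = pvDiffWitnessOut_solution.2 ∧ pvDiffWitnessOut_solution.1 ≠ pvDiffWitnessOut_solution.2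
def Claim_exact_solution : Prop := ∀ (k : Int) (m : Int) (score : List Int), Dom_solution k m score → Pre_solution k m score → D_solution k m score → solution k m score ≠ solution_alt k m score

-- ===== LEMMAS AND PROOFS =====

-- the loop body of port A, named for the proofs (definitionally equal to the lambda in `solution`)
def pvBody (m : Int) (t : List Int) (st : Int × Int) (i : Int) : Int × Int :=
  let st := if PySem.Int.mod i m == 0 && decide (0 < i)
            then (st.1 + m * st.2, (99999999 : Int)) else st
  (st.1, min st.2 (PySem.List.pyGetD t i 0))

-- the box-wise sum of port B, named for the proofs
def pvS (m : Int) (t : List Int) (q : Int) : Int :=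
  ((PySem.List.pyRange 0 q 1).map
    (fun j => m * PySem.List.pyGetD t ((j + 1) * m - 1) 0)).sum

-- the box-wise sum port A actually computes: each box minimum capped by the sentinel
def pvT (m : Int) (t : List Int) (q : Int) : Int :=
  ((PySem.List.pyRange 0 q 1).map
    (fun j => m * min 99999999 (PySem.List.pyGetD t ((j + 1) * m - 1) 0))).sum

theorem pvSolutionA_eq (k m : Int) (score : List Int) :
    solution k m score =
      (let t := PySem.List.sorted score (fun x => x) true
       let st := (PySem.List.pyRange 0 (t.length : Int) 1).foldl (pvBody m t) (0, 99999999)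
       if PySem.Int.mod (t.length : Int) m == 0 then st.1 + m * st.2 else st.1) := rfl

theorem pvSolutionB_eq (k m : Int) (score : List Int) :
    solution_alt k m score =
      pvS m (PySem.List.sorted score (fun x => x) true)
        (PySem.Int.floordiv ((PySem.List.sorted score (fun x => x) true).length : Int) m) := rfl

theorem pvDivSucc (M i : Nat) (hi : 1 ≤ i) :
    i / M = (i - 1) / M + if M ∣ i then 1 else 0 := by
  have h := Nat.succ_div (a := i - 1) (b := M)
  rwa [Nat.sub_add_cancel hi] at h

theorem pvGet (t : List Int) (j : Nat) (h : j < t.length) :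
    PySem.List.pyGetD t ((j : Nat) : Int) 0 = t[j] := by
  simp [List.getD_eq_getElem?_getD, List.getElem?_eq_getElem h]

theorem pvS_succ (m : Int) (t : List Int) (q : Int) (hq : 0 ≤ q) :
    pvS m t (q + 1) = pvS m t q + m * PySem.List.pyGetD t ((q + 1) * m - 1) 0 := by
  unfold pvS
  rw [PySem.List.pyRange_one_succ_right hq]
  simp

theorem pvT_succ (m : Int) (t : List Int) (q : Int) (hq : 0 ≤ q) :
    pvT m t (q + 1) = pvT m t q + m * min 99999999 (PySem.List.pyGetD t ((q + 1) * m - 1) 0) := by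
  unfold pvT
  rw [PySem.List.pyRange_one_succ_right hq]
  simp

-- loop invariant of port A: after i ≥ 1 iterations the accumulator holds the sentinel-capped
-- box-wise sum of the (i-1)/M closed boxes, and the running minimum is min(sentinel, t[i-1])
theorem pvInv (M : Nat) (hM : 1 ≤ M) (t : List Int)
    (hdesc : t.Pairwise (fun a b => b ≤ a)) :
    ∀ (i : Nat) (h1 : 1 ≤ i) (hle : i ≤ t.length),
    (PySem.List.pyRange 0 (i : Int) 1).foldl (pvBody (M : Int) t) (0, 99999999)
      = (pvT (M : Int) t (((i - 1) / M : Nat) : Int),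
         min 99999999 (t[i - 1]'(by omega))) := by
  intro i
  induction i with
  | zero => intro h1 _; omega
  | succ i ih =>
    intro _ hle
    by_cases hi0 : i = 0
    · subst hi0
      rw [show (((0 + 1 : Nat)) : Int) = 0 + 1 by norm_num,
          PySem.List.pyRange_one_succ_right (le_refl 0),
          PySem.List.pyRange_one_eq_nil (le_refl 0)]
      simp only [List.nil_append, List.foldl_cons, List.foldl_nil]
      have h2 : PySem.List.pyGetD t 0 0 = t[0]'(by omega) := by
        have := pvGet t 0 (by omega); simpa using this
      unfold pvBody
      simp [pvT, PySem.List.pyRange_one_eq_nil (le_refl 0), h2]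
    · have h1 : 1 ≤ i := by omega
      have hle' : i ≤ t.length := by omega
      have H := ih h1 hle'
      rw [show (((i + 1 : Nat)) : Int) = (i : Int) + 1 by push_cast; ring,
          PySem.List.pyRange_one_succ_right (by positivity : (0 : Int) ≤ (i : Int)),
          List.foldl_append, H]
      simp only [List.foldl_cons, List.foldl_nil]
      have hgi : PySem.List.pyGetD t ((i : Nat) : Int) 0 = t[i]'(by omega) := pvGet t i (by omega)
      have hd0 : (0 : Int) < (i : Int) := by exact_mod_cast h1
      unfold pvBody
      by_cases hmod : i % M = 0
      · -- box boundary: close box i/M - 1 and reset the sentinel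
        have hdvd : M ∣ i := Nat.dvd_of_mod_eq_zero hmod
        have hMi : M ≤ i := Nat.le_of_dvd (by omega) hdvd
        have hcond : (PySem.Int.mod (i : Int) (M : Int) == 0 && decide ((0 : Int) < (i : Int)))
            = true := by
          simp [PySem.Int.mod_natCast, hmod]
          omega
        simp only [hcond, if_true, hgi]
        have hq : (i + 1 - 1) / M = (i - 1) / M + 1 := by
          have := pvDivSucc M i h1
          rw [if_pos hdvd] at this
          simp only [Nat.add_sub_cancel]
          omega
        have hiq : ((((i - 1) / M : Nat) : Int) + 1) * (M : Int) = (i : Int) := by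
          obtain ⟨c, rfl⟩ := hdvd
          have hc : 1 ≤ c := by
            rcases Nat.eq_zero_or_pos c with hc0 | hc0
            · subst hc0; simp at h1
            · exact hc0
          have h2 : (M * c - 1) / M = c - 1 := by
            obtain ⟨d, rfl⟩ : ∃ d, c = d + 1 := ⟨c - 1, by omega⟩
            have h3 : M * (d + 1) = d * M + M := by ring
            have h4 : (d + 1) * M = d * M + M := by ring
            simp only [Nat.add_sub_cancel]
            exact Nat.div_eq_of_lt_le (by omega) (by omega)
          rw [h2]
          push_cast [Nat.cast_sub hc]
          ring
        have hS : pvT (M : Int) t (((i + 1 - 1) / M : Nat) : Int)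
            = pvT (M : Int) t (((i - 1) / M : Nat) : Int)
              + (M : Int) * min 99999999 (t[i - 1]'(by omega)) := by
          rw [hq, show (((i - 1) / M + 1 : Nat) : Int) = ((((i - 1) / M : Nat)) : Int) + 1 by
                push_cast; ring,
              pvT_succ _ _ _ (by positivity)]
          congr 2
          rw [show ((((i - 1) / M : Nat) : Int) + 1) * ((M : Nat) : Int) - 1
                = ((i - 1 : Nat) : Int) by rw [hiq]; push_cast [Nat.cast_sub h1]; ring]
          rw [pvGet t (i - 1) (by omega)]
        rw [hS]
        simp
      · -- interior of a box: the running minimum absorbs the new, smaller element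
        have hba : t[i]'(by omega) ≤ t[i - 1]'(by omega) :=
          List.pairwise_iff_getElem.mp hdesc (i - 1) i (by omega) (by omega) (by omega)
        have hcond : (PySem.Int.mod (i : Int) (M : Int) == 0 && decide ((0 : Int) < (i : Int)))
            = false := by
          simp [PySem.Int.mod_natCast, hd0]
          omega
        have hq : (i + 1 - 1) / M = (i - 1) / M := by
          have := pvDivSucc M i h1
          rw [if_neg (fun hd => hmod (Nat.dvd_iff_mod_eq_zero.mp hd))] at this
          simp only [Nat.add_sub_cancel]
          omega
        simp only [hcond, if_false, Bool.false_eq_true, hgi, hq, min_assoc, min_eq_right hba]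
        simp [Nat.add_sub_cancel]

-- what port A returns on a nonempty list: the sentinel-capped box-wise sum over all full boxes
theorem pvA_total (k : Int) (M : Nat) (hM : 1 ≤ M) (score : List Int)
    (hn : 1 ≤ (PySem.List.sorted score (fun x => x) true).length) :
    solution k (M : Int) score
      = pvT (M : Int) (PySem.List.sorted score (fun x => x) true)
          (((PySem.List.sorted score (fun x => x) true).length / M : Nat) : Int) := by
  set t := PySem.List.sorted score (fun x => x) true with ht
  have hdesc : t.Pairwise (fun a b => b ≤ a) :=
    PySem.List.sorted_pairwise_rev score (fun x => x)
  have H := pvInv M hM t hdesc t.length hn (le_refl _)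
  rw [pvSolutionA_eq]
  simp only [← ht, H]
  by_cases hz : t.length % M = 0
  · have hcond : (PySem.Int.mod ((t.length : Nat) : Int) ((M : Nat) : Int) == 0) = true := by
      simp [PySem.Int.mod_natCast, hz]
    rw [hcond, if_pos rfl]
    have hdvd : M ∣ t.length := Nat.dvd_of_mod_eq_zero hz
    have hMn : M ≤ t.length := Nat.le_of_dvd (by omega) hdvd
    have hq : t.length / M = (t.length - 1) / M + 1 := by
      rw [pvDivSucc M t.length hn, if_pos hdvd]
    have hiq : ((((t.length - 1) / M : Nat) : Int) + 1) * (M : Int) = (t.length : Int) := by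
      obtain ⟨c, hc0⟩ := hdvd
      have hc : 1 ≤ c := by
        rcases Nat.eq_zero_or_pos c with hc1 | hc1
        · rw [hc1, Nat.mul_zero] at hc0; omega
        · exact hc1
      have h2 : (t.length - 1) / M = c - 1 := by
        rw [hc0]
        obtain ⟨d, rfl⟩ : ∃ d, c = d + 1 := ⟨c - 1, by omega⟩
        have h3 : M * (d + 1) = d * M + M := by ring
        have h4 : (d + 1) * M = d * M + M := by ring
        simp only [Nat.add_sub_cancel]
        exact Nat.div_eq_of_lt_le (by omega) (by omega)
      rw [h2, hc0]
      push_cast [Nat.cast_sub hc]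
      ring
    rw [hq, show (((t.length - 1) / M + 1 : Nat) : Int) = ((((t.length - 1) / M : Nat)) : Int) + 1 by
          push_cast; ring,
        pvT_succ _ _ _ (by positivity)]
    congr 2
    rw [show ((((t.length - 1) / M : Nat) : Int) + 1) * ((M : Nat) : Int) - 1
          = ((t.length - 1 : Nat) : Int) by rw [hiq]; push_cast [Nat.cast_sub hn]; ring]
    rw [pvGet t (t.length - 1) (by omega)]
  · have hcond : (PySem.Int.mod ((t.length : Nat) : Int) ((M : Nat) : Int) == 0) = false := by
      simp [PySem.Int.mod_natCast]
      omega
    rw [hcond, if_neg (by simp)]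
    have hq : t.length / M = (t.length - 1) / M := by
      rw [pvDivSucc M t.length hn,
          if_neg (fun hd => hz (Nat.dvd_iff_mod_eq_zero.mp hd))]
      omega
    rw [hq]

-- what port B returns: the uncapped box-wise sum over all full boxes
theorem pvB_total (k : Int) (M : Nat) (score : List Int) :
    solution_alt k (M : Int) score
      = pvS (M : Int) (PySem.List.sorted score (fun x => x) true)
          (((PySem.List.sorted score (fun x => x) true).length / M : Nat) : Int) := by
  rw [pvSolutionB_eq, PySem.Int.floordiv_natCast]

-- when every full box's minimum is at most the sentinel the two box-wise sums agree
theorem pvT_eq_pvS (M : Nat) (hM : 1 ≤ M) (t : List Int)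
    (hsent : ∀ (j : Nat) (hj : j < t.length), M - 1 ≤ j → t[j] ≤ 99999999) :
    ∀ (q : Nat), q ≤ t.length / M → pvT (M : Int) t (q : Nat) = pvS (M : Int) t (q : Nat) := by
  intro q
  induction q with
  | zero => intro _; simp [pvT, pvS, PySem.List.pyRange_one_eq_nil (le_refl 0)]
  | succ q ih =>
    intro hq
    have hidx : (q + 1) * M - 1 < t.length := by
      have h1 : (q + 1) * M ≤ (t.length / M) * M := Nat.mul_le_mul hq (le_refl M)
      have h2 : (t.length / M) * M ≤ t.length := Nat.div_mul_le_self _ _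
      have h0 : 1 ≤ (q + 1) * M := by
        have := Nat.mul_le_mul (Nat.le_add_left 1 q) hM
        omega
      generalize hP : (q + 1) * M = P at h1 h0 ⊢
      omega
    have hcastq : ((q + 1 : Nat) : Int) = ((q : Nat) : Int) + 1 := by push_cast; ring
    have hcast : (((q : Nat) : Int) + 1) * ((M : Nat) : Int) - 1 = (((q + 1) * M - 1 : Nat) : Int) := by
      have : 1 ≤ (q + 1) * M := by
        have := Nat.mul_le_mul (Nat.le_add_left 1 q) hM
        omega
      push_cast [Nat.cast_sub this]
      ring
    rw [hcastq, pvT_succ _ _ _ (by positivity), pvS_succ _ _ _ (by positivity),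
        ih (by omega), hcast, pvGet t ((q + 1) * M - 1) hidx]
    have hle : M - 1 ≤ (q + 1) * M - 1 := by
      have := Nat.le_mul_of_pos_left M (show 0 < q + 1 by omega)
      omega
    rw [min_eq_right (hsent _ hidx hle)]

-- when the first full box's minimum exceeds the sentinel, A's capped sum is strictly smaller
theorem pvT_lt_pvS (M : Nat) (hM : 1 ≤ M) (t : List Int) (hMt : M - 1 < t.length)
    (hbox0 : 99999999 < t[M - 1]'(by omega)) :
    ∀ (q : Nat), 1 ≤ q → q ≤ t.length / M → pvT (M : Int) t (q : Nat) < pvS (M : Int) t (q : Nat) := by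
  intro q
  induction q with
  | zero => intro h1 _; omega
  | succ q ih =>
    intro _ hq
    have hidx : (q + 1) * M - 1 < t.length := by
      have h1 : (q + 1) * M ≤ (t.length / M) * M := Nat.mul_le_mul hq (le_refl M)
      have h2 : (t.length / M) * M ≤ t.length := Nat.div_mul_le_self _ _
      have h0 : 1 ≤ (q + 1) * M := by
        have := Nat.mul_le_mul (Nat.le_add_left 1 q) hM
        omega
      generalize hP : (q + 1) * M = P at h1 h0 ⊢
      omega
    have hcastq : ((q + 1 : Nat) : Int) = ((q : Nat) : Int) + 1 := by push_cast; ring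
    have hcast : (((q : Nat) : Int) + 1) * ((M : Nat) : Int) - 1 = (((q + 1) * M - 1 : Nat) : Int) := by
      have : 1 ≤ (q + 1) * M := by
        have := Nat.mul_le_mul (Nat.le_add_left 1 q) hM
        omega
      push_cast [Nat.cast_sub this]
      ring
    have hMpos : (0 : Int) < (M : Int) := by exact_mod_cast hM
    rw [hcastq, pvT_succ _ _ _ (by positivity), pvS_succ _ _ _ (by positivity),
        hcast, pvGet t ((q + 1) * M - 1) hidx]
    by_cases hq0 : q = 0
    · subst hq0
      have he : (0 + 1) * M - 1 = M - 1 := by omega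
      simp only [he]
      have h0 : pvT (M : Int) t ((0 : Nat) : Int) = pvS (M : Int) t ((0 : Nat) : Int) := by
        simp [pvT, pvS, PySem.List.pyRange_one_eq_nil (le_refl 0)]
      rw [h0]
      have hmin : min (99999999 : Int) (t[M - 1]'(by omega)) = 99999999 :=
        min_eq_left (le_of_lt hbox0)
      rw [hmin]
      have := mul_lt_mul_of_pos_left hbox0 hMpos
      omega
    · have hstep : (M : Int) * min 99999999 (t[(q + 1) * M - 1]'(by omega))
          ≤ (M : Int) * t[(q + 1) * M - 1]'(by omega) :=
        mul_le_mul_of_nonneg_left (min_le_right _ _) (by positivity)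
      have hlt := ih (by omega) (by omega)
      omega

-- ===== VERDICT (by name: the statement is the Claim_ definition above) =====
theorem solution_spec : Claim_unchanged_solution := by
  intro k m score _ hpre hD
  unfold Pre_solution at hpre
  unfold D_solution at hD
  push_neg at hD
  obtain ⟨hne, hcnt⟩ := hD
  obtain ⟨M, rfl⟩ : ∃ M : Nat, m = (M : Int) := ⟨m.toNat, (Int.toNat_of_nonneg (by omega)).symm⟩
  have hM : 1 ≤ M := by exact_mod_cast hpre
  set t := PySem.List.sorted score (fun x => x) true with ht
  have hperm : t.Perm score := PySem.List.sorted_perm score (fun x => x) true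
  have hn : 1 ≤ t.length := by
    rw [hperm.length_eq]
    exact List.length_pos_of_ne_nil hne
  have hdesc : t.Pairwise (fun a b => b ≤ a) :=
    PySem.List.sorted_pairwise_rev score (fun x => x)
  have hcnt' : (t.countP (fun x => 99999999 < x) : Int) < (M : Int) := by
    rw [hperm.countP_eq]
    exact hcnt
  have hsent : ∀ (j : Nat) (hj : j < t.length), M - 1 ≤ j → t[j] ≤ 99999999 := by
    intro j hj hMj
    by_contra hgt
    push_neg at hgt
    have htake : ∀ x ∈ t.take (j + 1), (fun x => decide (99999999 < x)) x = true := by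
      intro x hx
      obtain ⟨a, ha, rfl⟩ := List.mem_iff_getElem.mp hx
      have ha' : a < j + 1 := lt_of_lt_of_le ha (by simp [List.length_take])
      rw [List.getElem_take]
      by_cases hav : a = j
      · subst hav; simpa using hgt
      · have hle : t[j] ≤ t[a]'(by omega) :=
          List.pairwise_iff_getElem.mp hdesc a j (by omega) hj (by omega)
        simp only [decide_eq_true_eq]
        omega
    have hc1 : (t.take (j + 1)).countP (fun x => 99999999 < x) = j + 1 := by
      rw [List.countP_eq_length.mpr htake]
      simp [List.length_take]
      omega
    have hc2 : t.countP (fun x => 99999999 < x)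
        = (t.take (j + 1)).countP (fun x => 99999999 < x)
          + (t.drop (j + 1)).countP (fun x => 99999999 < x) := by
      conv_lhs => rw [← List.take_append_drop (j + 1) t]
      rw [List.countP_append]
    omega
  show solution k (M : Int) score = solution_alt k (M : Int) score
  rw [pvA_total k M hM score (by rw [← ht]; exact hn), pvB_total k M score, ← ht]
  exact pvT_eq_pvS M hM t hsent (t.length / M) (le_refl _)

theorem solution_changed : Claim_changed_solution := by
  unfold Claim_changed_solution; decide

theorem solution_tight : Claim_exact_solution := by
  intro k m score _ hpre hD
  unfold Pre_solution at hpre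
  obtain ⟨M, rfl⟩ : ∃ M : Nat, m = (M : Int) := ⟨m.toNat, (Int.toNat_of_nonneg (by omega)).symm⟩
  have hM : 1 ≤ M := by exact_mod_cast hpre
  set t := PySem.List.sorted score (fun x => x) true with ht
  have hperm : t.Perm score := PySem.List.sorted_perm score (fun x => x) true
  have hdesc : t.Pairwise (fun a b => b ≤ a) :=
    PySem.List.sorted_pairwise_rev score (fun x => x)
  unfold D_solution at hD
  rcases hD with hnil | hcnt
  · -- empty list: A returns M * 99999999 from the untouched sentinel, B returns 0
    subst hnil
    have htnil : t = [] := hperm.eq_nil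
    rw [pvSolutionA_eq, pvSolutionB_eq, ← ht]
    rw [htnil]
    have hr : PySem.List.pyRange 0 ((([] : List Int).length : Nat) : Int) 1 = [] := by
      simp [PySem.List.pyRange_one_eq_nil]
    simp only [hr, List.foldl_nil]
    have hcond : (PySem.Int.mod ((([] : List Int).length : Nat) : Int) ((M : Nat) : Int) == 0)
        = true := by
      have h00 := PySem.Int.mod_natCast 0 M
      simp only [Nat.cast_zero] at h00
      simp [h00]
    rw [hcond, if_pos rfl]
    have hfl : PySem.Int.floordiv ((([] : List Int).length : Nat) : Int) ((M : Nat) : Int)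
        = ((0 : Nat) : Int) := by
      rw [PySem.Int.floordiv_natCast]
      simp
    rw [hfl]
    have hB : pvS ((M : Nat) : Int) ([] : List Int) ((0 : Nat) : Int) = 0 := by
      simp [pvS, PySem.List.pyRange_one_eq_nil (le_refl 0)]
    rw [hB]
    have hMpos : (0 : Int) < (M : Int) := by exact_mod_cast hM
    have : (0 : Int) < (M : Int) * 99999999 := by positivity
    omega
  · -- at least the M largest scores exceed the sentinel: A caps box 0, B does not
    have hcntN : M ≤ t.countP (fun x => 99999999 < x) := by
      have : (t.countP (fun x => 99999999 < x) : Int) = (score.countP (fun x => 99999999 < x) : Int) := by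
        exact_mod_cast hperm.countP_eq _
      omega
    have hMt : M - 1 < t.length := by
      have := List.countP_le_length (l := t) (p := fun x => decide (99999999 < x))
      omega
    have hbox0 : 99999999 < t[M - 1]'(by omega) := by
      by_contra hle
      push_neg at hle
      have hdrop : ∀ x ∈ t.drop (M - 1), ¬ ((fun x => decide (99999999 < x)) x = true) := by
        intro x hx
        obtain ⟨a, ha, rfl⟩ := List.mem_iff_getElem.mp hx
        rw [List.getElem_drop]
        have hidx : M - 1 ≤ M - 1 + a := by omega
        have hlt : M - 1 + a < t.length := by
          have hdl : (t.drop (M - 1)).length = t.length - (M - 1) := by simp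
          omega
        have : t[M - 1 + a]'(hlt) ≤ t[M - 1]'(by omega) := by
          by_cases haz : a = 0
          · subst haz; simp
          · exact List.pairwise_iff_getElem.mp hdesc (M - 1) (M - 1 + a) (by omega) hlt (by omega)
        simp only [decide_eq_true_eq]
        omega
      have hc0 : (t.drop (M - 1)).countP (fun x => 99999999 < x) = 0 :=
        List.countP_eq_zero.mpr hdrop
      have hc2 : t.countP (fun x => 99999999 < x)
          = (t.take (M - 1)).countP (fun x => 99999999 < x)
            + (t.drop (M - 1)).countP (fun x => 99999999 < x) := by
        conv_lhs => rw [← List.take_append_drop (M - 1) t]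
        rw [List.countP_append]
      have hc3 : (t.take (M - 1)).countP (fun x => 99999999 < x) ≤ M - 1 := by
        have := List.countP_le_length (l := t.take (M - 1)) (p := fun x => decide (99999999 < x))
        have := List.length_take_le (M - 1) t
        omega
      omega
    have hq1 : 1 ≤ t.length / M := by
      have hMn : M ≤ t.length := by omega
      exact Nat.one_le_div_iff (by omega) |>.mpr hMn
    have hn : 1 ≤ t.length := by omega
    have hlt := pvT_lt_pvS M hM t hMt hbox0 (t.length / M) hq1 (le_refl _)
    rw [pvA_total k M hM score (by rw [← ht]; exact hn), pvB_total k M score, ← ht]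
    omega
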